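-- pv_equiv track=rewrite | github.com/Bzyli/candy-crush | casse_bonbons.py | detect_voisin
-- ===== SOURCE A (Python) =====
-- def detect_voisin(grille,liste_current,liste_bords,liste_traitee,liste_a_traiter):
--     """
--     Fonction qui déteccte les voisins de la case actuelle et qui renvoie la liste de ces voisins
--
--     Paramètres:
--     ----------
--     grille : list
--         grille de jeu
--     liste_current : list
--         liste des coordonnées actuelles
--     liste_bords : list
--         liste permettant de savoir si la case sur laquelle on se trouve est sur un bord
--     liste_traitee : list
--         liste des coordonnées déjà explorées
--     liste_a_traiter : list
--         liste des coordonnées à explorer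
--
--     Retour:
--     -------
--     liste_voisins : list
--         liste contenant les voisins de la case actuelle et qui ont la même valeur que celle-ci, contient uniquement des cases non visitées ou qui ne sont pas déjà prévues d'être visitées
--
--     """
--     borne_gauche = -1
--     borne_droite = 1
--     borne_haute = -1
--     borne_basse = 1
--     x_case = liste_current[0]
--     y_case = liste_current[1]
--     liste_voisins = []
--     if liste_bords[0] == True:
--        borne_gauche = 0
--     if liste_bords[1] == True:
--         borne_droite = 0
--     if liste_bords[2] == True:
--        borne_haute = 0
--     if liste_bords[3] == True:
--         borne_basse = 0
--     for i in range(borne_gauche,borne_droite + 1):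
--         if y_case + i != y_case and grille[x_case][y_case] == grille[x_case][y_case + i]:
--             liste_voisins.append([x_case,y_case + i])
--     for j in range(borne_haute,borne_basse +1):
--             if x_case + j != x_case and grille[x_case][y_case] == grille[x_case + j][y_case]:
--                 liste_voisins.append([x_case + j,y_case])
--     i = 0
--     while i  < len(liste_voisins):
--         if liste_voisins[i] in liste_traitee:
--             del liste_voisins[i]
--         elif liste_voisins[i] in liste_a_traiter:
--             del liste_voisins[i]
--         else:
--             i += 1
--     return liste_voisins
-- ===== SOURCE B (Python) =====
-- def detect_voisin(grille, liste_current, liste_bords, liste_traitee, liste_a_traiter):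
--     x = liste_current[0]
--     y = liste_current[1]
--     liste_voisins = []
--     for nx, ny, b in ((x, y - 1, 0), (x, y + 1, 1), (x - 1, y, 2), (x + 1, y, 3)):
--         if liste_bords[b] == True:
--             continue
--         if grille[x][y] == grille[nx][ny] and [nx, ny] not in liste_traitee and [nx, ny] not in liste_a_traiter:
--             liste_voisins.append([nx, ny])
--     return liste_voisins
-- ===== Notes on version B (the rewrite author's own statement) =====
-- stated objective: simpler
-- what changed: B replaces A's two border-bound range loops plus a separate while-delete pruning pass with a single filtering pass over an explicit list of the four neighbor candidates, checking the border flag, the color match and non-membership in the visited/pending lists in one condition.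
import Mathlib
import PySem

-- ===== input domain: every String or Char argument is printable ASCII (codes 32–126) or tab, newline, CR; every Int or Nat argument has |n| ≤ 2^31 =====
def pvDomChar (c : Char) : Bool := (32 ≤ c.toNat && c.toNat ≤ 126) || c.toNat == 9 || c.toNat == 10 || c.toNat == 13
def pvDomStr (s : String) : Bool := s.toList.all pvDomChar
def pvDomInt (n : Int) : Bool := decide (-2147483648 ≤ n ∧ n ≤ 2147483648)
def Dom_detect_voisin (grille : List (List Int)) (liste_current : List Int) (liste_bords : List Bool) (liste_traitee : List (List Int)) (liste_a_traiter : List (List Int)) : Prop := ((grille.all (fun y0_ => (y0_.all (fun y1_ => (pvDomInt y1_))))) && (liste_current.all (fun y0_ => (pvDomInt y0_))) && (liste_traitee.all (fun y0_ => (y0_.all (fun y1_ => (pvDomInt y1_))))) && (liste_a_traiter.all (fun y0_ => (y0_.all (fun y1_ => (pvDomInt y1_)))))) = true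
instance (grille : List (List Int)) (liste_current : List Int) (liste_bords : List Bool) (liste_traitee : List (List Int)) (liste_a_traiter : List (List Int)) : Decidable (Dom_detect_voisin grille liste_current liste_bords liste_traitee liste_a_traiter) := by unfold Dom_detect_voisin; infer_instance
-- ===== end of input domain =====

-- ===== PORT A =====
-- B is a single filtering pass over an explicit 4-candidate neighbor list (flag, equality and
-- visited-membership checked together), replacing A's two range-loops plus a separate while-delete
-- pruning loop; objective: simpler. Equal return values are proved on Pre_ (exactly where A returns).

-- shared grid access grille[a][b] (defaulted out of range; Pre_ keeps every used access in range)
def pvCell (grille : List (List Int)) (a b : Int) : Int :=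
  (PySem.List.pyGet? ((PySem.List.pyGet? grille a).getD []) b).getD 0

-- A's trailing while-loop: delete elements found in liste_traitee or liste_a_traiter
def pvPruneA (liste_traitee liste_a_traiter : List (List Int)) : List (List Int) → List (List Int)
  | [] => []
  | v :: rest =>
    if v ∈ liste_traitee then pvPruneA liste_traitee liste_a_traiter rest
    else if v ∈ liste_a_traiter then pvPruneA liste_traitee liste_a_traiter rest
    else v :: pvPruneA liste_traitee liste_a_traiter rest

def detect_voisin (grille : List (List Int)) (liste_current : List Int) (liste_bords : List Bool) (liste_traitee : List (List Int)) (liste_a_traiter : List (List Int)) : List (List Int) :=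
  let x := (PySem.List.pyGet? liste_current 0).getD 0
  let y := (PySem.List.pyGet? liste_current 1).getD 0
  let borne_gauche : Int := if (PySem.List.pyGet? liste_bords 0).getD false = true then 0 else -1
  let borne_droite : Int := if (PySem.List.pyGet? liste_bords 1).getD false = true then 0 else 1
  let borne_haute : Int := if (PySem.List.pyGet? liste_bords 2).getD false = true then 0 else -1
  let borne_basse : Int := if (PySem.List.pyGet? liste_bords 3).getD false = true then 0 else 1
  let v1 := (PySem.List.pyRange borne_gauche (borne_droite + 1) 1).foldl (fun acc i =>
      if y + i ≠ y ∧ pvCell grille x y = pvCell grille x (y + i) then acc ++ [[x, y + i]] else acc) []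
  let v2 := (PySem.List.pyRange borne_haute (borne_basse + 1) 1).foldl (fun acc j =>
      if x + j ≠ x ∧ pvCell grille x y = pvCell grille (x + j) y then acc ++ [[x + j, y]] else acc) v1
  pvPruneA liste_traitee liste_a_traiter v2

-- ===== PORT B =====
def detect_voisin_alt (grille : List (List Int)) (liste_current : List Int) (liste_bords : List Bool) (liste_traitee : List (List Int)) (liste_a_traiter : List (List Int)) : List (List Int) :=
  let x := (PySem.List.pyGet? liste_current 0).getD 0
  let y := (PySem.List.pyGet? liste_current 1).getD 0
  ([(x, y - 1, (0 : Int)), (x, y + 1, 1), (x - 1, y, 2), (x + 1, y, 3)]).foldl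
    (fun acc c =>
      if (PySem.List.pyGet? liste_bords c.2.2).getD false = true then acc
      else if pvCell grille x y = pvCell grille c.1 c.2.1 ∧
              [c.1, c.2.1] ∉ liste_traitee ∧ [c.1, c.2.1] ∉ liste_a_traiter
           then acc ++ [[c.1, c.2.1]] else acc) []

-- ===== PRECONDITION & SPEC =====
-- Pre_ = exactly the inputs on which the Python A returns (no IndexError): both coordinate and all
-- four border flags present, and every grid access A performs (per Python's negative-index rule) in range.
def Pre_detect_voisin (grille : List (List Int)) (liste_current : List Int) (liste_bords : List Bool) (liste_traitee : List (List Int)) (liste_a_traiter : List (List Int)) : Prop :=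
  2 ≤ liste_current.length ∧ 4 ≤ liste_bords.length ∧
  (let x := (PySem.List.pyGet? liste_current 0).getD 0
   let y := (PySem.List.pyGet? liste_current 1).getD 0
   let b0 := (PySem.List.pyGet? liste_bords 0).getD false
   let b1 := (PySem.List.pyGet? liste_bords 1).getD false
   let b2 := (PySem.List.pyGet? liste_bords 2).getD false
   let b3 := (PySem.List.pyGet? liste_bords 3).getD false
   (¬(b0 = true ∧ b1 = true ∧ b2 = true ∧ b3 = true) →
      PySem.Raise.InRange grille.length x ∧
      PySem.Raise.InRange ((PySem.List.pyGet? grille x).getD []).length y) ∧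
   (b0 = false → PySem.Raise.InRange ((PySem.List.pyGet? grille x).getD []).length (y - 1)) ∧
   (b1 = false → PySem.Raise.InRange ((PySem.List.pyGet? grille x).getD []).length (y + 1)) ∧
   (b2 = false → PySem.Raise.InRange grille.length (x - 1) ∧
      PySem.Raise.InRange ((PySem.List.pyGet? grille (x - 1)).getD []).length y) ∧
   (b3 = false → PySem.Raise.InRange grille.length (x + 1) ∧
      PySem.Raise.InRange ((PySem.List.pyGet? grille (x + 1)).getD []).length y))
instance (grille : List (List Int)) (liste_current : List Int) (liste_bords : List Bool) (liste_traitee : List (List Int)) (liste_a_traiter : List (List Int)) : Decidable (Pre_detect_voisin grille liste_current liste_bords liste_traitee liste_a_traiter) := by unfold Pre_detect_voisin; infer_instance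

def pvWitness_detect_voisin : List (List Int) × List Int × List Bool × List (List Int) × List (List Int) :=
  ([[1, 1], [1, 2]], [0, 0], [true, false, true, false], [], [[1, 0]])

def Spec_detect_voisin (grille : List (List Int)) (liste_current : List Int) (liste_bords : List Bool) (liste_traitee : List (List Int)) (liste_a_traiter : List (List Int)) (out : List (List Int)) : Prop := out = detect_voisin_alt grille liste_current liste_bords liste_traitee liste_a_traiter
instance (grille : List (List Int)) (liste_current : List Int) (liste_bords : List Bool) (liste_traitee : List (List Int)) (liste_a_traiter : List (List Int)) (out : List (List Int)) : Decidable (Spec_detect_voisin grille liste_current liste_bords liste_traitee liste_a_traiter out) := by unfold Spec_detect_voisin; infer_instance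

-- ===== CLAIM (what is proved, stated in full; the proofs are below) =====
def Claim_equal_detect_voisin : Prop := ∀ (grille : List (List Int)) (liste_current : List Int) (liste_bords : List Bool) (liste_traitee : List (List Int)) (liste_a_traiter : List (List Int)), Dom_detect_voisin grille liste_current liste_bords liste_traitee liste_a_traiter → Pre_detect_voisin grille liste_current liste_bords liste_traitee liste_a_traiter → Spec_detect_voisin grille liste_current liste_bords liste_traitee liste_a_traiter (detect_voisin grille liste_current liste_bords liste_traitee liste_a_traiter)

-- ===== LEMMAS AND PROOFS =====
theorem pvRangeM11 : PySem.List.pyRange (-1) (1 + 1) 1 = [-1, 0, 1] := by decide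
theorem pvRange01 : PySem.List.pyRange 0 (1 + 1) 1 = [0, 1] := by decide
theorem pvRangeM10 : PySem.List.pyRange (-1) (0 + 1) 1 = [-1, 0] := by decide
theorem pvRange00 : PySem.List.pyRange 0 (0 + 1) 1 = [0] := by decide

theorem pvIteAppend {α : Type} (c : Prop) [Decidable c] (acc : List α) (v : α) :
    (if c then acc ++ [v] else acc) = acc ++ (if c then [v] else []) := by
  split_ifs <;> simp

theorem pvPruneA_append (t a : List (List Int)) (u w : List (List Int)) :
    pvPruneA t a (u ++ w) = pvPruneA t a u ++ pvPruneA t a w := by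
  induction u with
  | nil => simp [pvPruneA]
  | cons h tl ih =>
      simp only [List.cons_append, pvPruneA]
      split_ifs <;> simp [ih]

theorem pvPruneA_ite (t a : List (List Int)) (c : Prop) [Decidable c] (v : List Int) :
    pvPruneA t a (if c then [v] else []) = if c ∧ v ∉ t ∧ v ∉ a then [v] else [] := by
  split_ifs <;> simp_all [pvPruneA]

-- ===== VERDICT (by name: the statement is the Claim_ definition above) =====
theorem detect_voisin_spec : Claim_equal_detect_voisin := by
  intro grille liste_current liste_bords liste_traitee liste_a_traiter hD hP
  clear hD hP
  unfold Spec_detect_voisin detect_voisin detect_voisin_alt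
  set x := (PySem.List.pyGet? liste_current 0).getD 0 with hx
  set y := (PySem.List.pyGet? liste_current 1).getD 0 with hy
  clear hx hy
  have hm1 : y + -1 = y - 1 := by omega
  have hne1 : (y + -1 ≠ y) = True := eq_true (by omega)
  have hne1' : (y + 1 ≠ y) = True := eq_true (by omega)
  have hne0 : (y + 0 ≠ y) = False := eq_false (by omega)
  have gm1 : x + -1 = x - 1 := by omega
  have gne1 : (x + -1 ≠ x) = True := eq_true (by omega)
  have gne1' : (x + 1 ≠ x) = True := eq_true (by omega)
  have gne0 : (x + 0 ≠ x) = False := eq_false (by omega)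
  have hneS : (y - 1 ≠ y) = True := eq_true (by omega)
  have gneS : (x - 1 ≠ x) = True := eq_true (by omega)
  by_cases h0 : (PySem.List.pyGet? liste_bords 0).getD false = true <;>
  by_cases h1 : (PySem.List.pyGet? liste_bords 1).getD false = true <;>
  by_cases h2 : (PySem.List.pyGet? liste_bords 2).getD false = true <;>
  by_cases h3 : (PySem.List.pyGet? liste_bords 3).getD false = true <;>
    simp only [h0, h1, h2, h3, eq_self_iff_true, Bool.false_eq_true, if_true, if_false,
      ite_true, ite_false, pvRangeM11, pvRange01, pvRangeM10, pvRange00, List.foldl,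
      hne1, hne1', hne0, gne1, gne1', gne0, hneS, gneS, hm1, gm1, true_and, false_and,
      pvIteAppend, List.nil_append, List.append_nil, List.append_assoc,
      pvPruneA_append, pvPruneA_ite, pvPruneA] <;>
    first
      | rfl
      | (split_ifs <;> simp_all)
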